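-- pv_equiv track=rewrite | github.com/sonyaallin/eecs4401 | assignments/assignment-resources/more-resources/2023/Self-Assessments/Assignment2/siddi713/funpuzz_csp.py | is_constraint_satisfied
-- ===== SOURCE A (Python) =====
-- from itertools import permutations, product
--
-- def is_constraint_satisfied(values, operation, target):
--   """Returns True if the constraint is satisfied by the assignment, and False otherwise.
--   """
--   total = values[0]
--   if (operation == 0):
--     for i in values[1:]:
--       total += i
--     return total == target
--   elif (operation == 1):
--     perms = list(permutations(values, len(values)))
--     for perm in perms:
--       total = perm[0]
--       for i in perm[1:]:
--         total -= i
--       if (total == target):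
--         return True
--     return False
--   elif (operation == 2):
--     perms = list(permutations(values, len(values)))
--     for perm in perms:
--       total = perm[0]
--       for i in perm[1:]:
--         total //= i
--       if (total == target):
--         return True
--     return False
--   elif (operation == 3):
--     for i in values[1:]:
--       total *= i
--   return total == target
-- ===== SOURCE B (Python) =====
-- def _reach(v, rest, target):
--     """True iff chaining floor-division of v by some ordering of rest hits target."""
--     if not rest:
--         return v == target
--     return any(_reach(v // rest[i], rest[:i] + rest[i + 1:], target)
--                for i in range(len(rest)))
--
--
-- def is_constraint_satisfied(values, operation, target):
--     """Returns True if the constraint is satisfied by the assignment, and False otherwise."""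
--     if operation == 0:
--         return sum(values) == target
--     if operation == 1:
--         # every permutation evaluates to 2*first - sum(values): test each first element
--         s = sum(values)
--         return any(2 * v - s == target for v in values)
--     if operation == 2:
--         # depth-first backtracking over orderings, no permutation list materialised
--         return any(_reach(values[i], values[:i] + values[i + 1:], target)
--                    for i in range(len(values)))
--     if operation == 3:
--         p = 1
--         for v in values:
--             p *= v
--         return p == target
--     return values[0] == target
-- ===== Notes on version B (the rewrite author's own statement) =====
-- stated objective: alternative
-- what changed: B drops the permutation enumeration: '+' becomes a sum test, '-' a first-element test (every permutation evaluates to 2*first - sum(values)), '*' a product, and '//' recursive backtracking over orderings with no materialised permutation list.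
-- outside the precondition, e.g. on is_constraint_satisfied([0, 2], 2, 0): A returns True, B returns True
import Mathlib
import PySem

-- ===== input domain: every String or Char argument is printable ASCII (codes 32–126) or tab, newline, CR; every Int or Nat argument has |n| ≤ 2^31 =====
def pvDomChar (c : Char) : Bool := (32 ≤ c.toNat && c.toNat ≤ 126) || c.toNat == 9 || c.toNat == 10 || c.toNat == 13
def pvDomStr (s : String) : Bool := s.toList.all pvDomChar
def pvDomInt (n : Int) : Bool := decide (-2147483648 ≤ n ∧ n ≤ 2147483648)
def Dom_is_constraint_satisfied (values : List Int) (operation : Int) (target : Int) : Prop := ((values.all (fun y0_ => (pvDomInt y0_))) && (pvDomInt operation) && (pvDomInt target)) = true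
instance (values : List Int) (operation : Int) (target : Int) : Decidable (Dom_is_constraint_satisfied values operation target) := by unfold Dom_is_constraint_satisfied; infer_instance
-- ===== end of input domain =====

-- B drops A's permutation enumeration: '+' becomes a sum test, '-' a first-element test,
-- '*' a product, '//' recursive backtracking with no materialised permutation list.

-- ===== PORT A =====
-- itertools.permutations(values, len(values)) ↦ PySem.List.permutations values values.length
def is_constraint_satisfied (values : List Int) (operation : Int) (target : Int) : Bool :=
  -- values[0]; Pre_ excludes values = [], where the Python raises IndexError
  let total := values.headD 0
  if operation = 0 then
    ((values.drop 1).foldl (· + ·) total) == target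
  else if operation = 1 then
    (PySem.List.permutations values values.length).any
      (fun perm => ((perm.drop 1).foldl (· - ·) (perm.headD 0)) == target)
  else if operation = 2 then
    (PySem.List.permutations values values.length).any
      (fun perm => ((perm.drop 1).foldl PySem.Int.floordiv (perm.headD 0)) == target)
  else
    let total := if operation = 3 then (values.drop 1).foldl (· * ·) total else total
    total == target

-- ===== PORT B =====
-- _reach(v, rest, target); the recursion is on 'rest', which loses one element per call, so a
-- 'fuel' counter starting at the length of the initial list bounds the depth exactly (the
-- 'fuel = 0' branch is unreachable while fuel ≥ rest.length); rest[i] with i < len(rest) is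
-- rest.getD i 0 (always in range, never Python's IndexError)
def reachB (fuel : Nat) (target v : Int) (rest : List Int) : Bool :=
  if rest.isEmpty then v == target
  else
    match fuel with
    | 0 => false
    | fuel + 1 =>
      (List.range rest.length).any fun i =>
        reachB fuel target (PySem.Int.floordiv v (rest.getD i 0)) (rest.eraseIdx i)

def is_constraint_satisfied_alt (values : List Int) (operation : Int) (target : Int) : Bool :=
  if operation = 0 then
    values.sum == target
  else if operation = 1 then
    let s := values.sum
    values.any (fun v => 2 * v - s == target)
  else if operation = 2 then
    (List.range values.length).any fun i =>
      reachB values.length target (values.getD i 0) (values.eraseIdx i)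
  else if operation = 3 then
    (values.foldl (· * ·) 1) == target
  else
    (values.headD 0) == target   -- values[0]; Pre_ excludes values = []

-- ===== PRECONDITION & SPEC =====
-- Pre_ excludes empty lists (values[0] raises IndexError) and division cages (operation 2) of
-- length ≥ 2 containing 0, on which A generally raises ZeroDivisionError (on a few of these,
-- e.g. ([0, 2], 2, 0), the identity permutation matches before any zero divide and A returns
-- True — B returns True there too).
def Pre_is_constraint_satisfied (values : List Int) (operation : Int) (target : Int) : Prop :=
  values ≠ [] ∧ (operation = 2 → 2 ≤ values.length → (0 : Int) ∉ values)
instance (values : List Int) (operation : Int) (target : Int) : Decidable (Pre_is_constraint_satisfied values operation target) := by unfold Pre_is_constraint_satisfied; infer_instance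

def pvWitness_is_constraint_satisfied : List Int × Int × Int := ([1, 2], 0, 3)

def Spec_is_constraint_satisfied (values : List Int) (operation : Int) (target : Int) (out : Bool) : Prop := out = is_constraint_satisfied_alt values operation target
instance (values : List Int) (operation : Int) (target : Int) (out : Bool) : Decidable (Spec_is_constraint_satisfied values operation target out) := by unfold Spec_is_constraint_satisfied; infer_instance

-- ===== CLAIM (what is proved, stated in full; the proofs are below) =====
def Claim_equal_is_constraint_satisfied : Prop := ∀ (values : List Int) (operation : Int) (target : Int), Dom_is_constraint_satisfied values operation target → Pre_is_constraint_satisfied values operation target → Spec_is_constraint_satisfied values operation target (is_constraint_satisfied values operation target)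

-- ===== LEMMAS AND PROOFS =====

theorem foldl_sub_eq (t : List Int) : ∀ v : Int, t.foldl (· - ·) v = v - t.sum := by
  induction t with
  | nil => simp
  | cons x t ih => intro v; simp only [List.foldl_cons, ih, List.sum_cons]; ring

theorem foldl_add_eq (t : List Int) : ∀ v : Int, t.foldl (· + ·) v = v + t.sum := by
  induction t with
  | nil => simp
  | cons x t ih => intro v; simp only [List.foldl_cons, ih, List.sum_cons]; ring

theorem foldl_mul_eq (t : List Int) : ∀ v : Int, t.foldl (· * ·) v = v * t.prod := by
  induction t with
  | nil => simp
  | cons x t ih => intro v; simp only [List.foldl_cons, ih, List.prod_cons]; ring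

theorem perm_mem_pyPerms (p : List Int) :
    ∀ xs : List Int, p.Perm xs → p ∈ PySem.List.permutations xs xs.length := by
  induction p with
  | nil =>
    intro xs h
    have : xs = [] := h.symm.eq_nil
    subst this; simp [PySem.List.permutations_zero]
  | cons a q ih =>
    intro xs hperm
    have hlen : xs.length = q.length + 1 := by
      have := hperm.length_eq; simpa using this.symm
    obtain ⟨j, hj, hget⟩ := List.getElem_of_mem (hperm.mem_iff.mp (List.mem_cons_self))
    subst hget
    have hq : q.Perm (xs.eraseIdx j) := by
      have h1 : (xs[j] :: xs.eraseIdx j).Perm xs :=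
        PySem.List.perm_cons_eraseIdx xs (List.getElem?_eq_getElem hj)
      exact (hperm.trans h1.symm).cons_inv
    rw [hlen, PySem.List.permutations_succ]
    refine List.mem_flatMap.mpr ⟨j, List.mem_range.mpr hj, ?_⟩
    rw [List.getElem?_eq_getElem hj]
    refine List.mem_map.mpr ⟨q, ?_, rfl⟩
    have hlen2 : (xs.eraseIdx j).length = q.length := by
      rw [List.length_eraseIdx_of_lt hj]; omega
    have := ih _ hq
    rwa [hlen2] at this

-- membership in the full-length itertools permutation list is exactly List.Perm
theorem mem_pyPerms_iff (p xs : List Int) :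
    p ∈ PySem.List.permutations xs xs.length ↔ p.Perm xs :=
  ⟨PySem.List.perm_of_mem_permutations, perm_mem_pyPerms p xs⟩

-- B's backtracking reaches target iff some ordering of rest, chained by floor division, does
theorem reachB_iff (target : Int) :
    ∀ fuel (rest : List Int), rest.length ≤ fuel → ∀ v : Int,
      (reachB fuel target v rest = true ↔
        ∃ q : List Int, q.Perm rest ∧ q.foldl PySem.Int.floordiv v = target) := by
  intro fuel
  induction fuel with
  | zero =>
    intro rest hlen v
    have : rest = [] := List.eq_nil_of_length_eq_zero (by omega)
    subst this
    rw [reachB]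
    simp only [List.isEmpty_nil, if_true, beq_iff_eq]
    constructor
    · intro h; exact ⟨[], List.Perm.refl _, by simpa using h⟩
    · rintro ⟨q, hq, hfold⟩
      have : q = [] := hq.eq_nil
      subst this; simpa using hfold
  | succ fuel ih =>
    intro rest hlen v
    rcases rest with _ | ⟨x, t⟩
    · rw [reachB]
      simp only [List.isEmpty_nil, if_true, beq_iff_eq]
      constructor
      · intro h; exact ⟨[], List.Perm.refl _, by simpa using h⟩
      · rintro ⟨q, hq, hfold⟩
        have : q = [] := hq.eq_nil
        subst this; simpa using hfold
    · rw [reachB]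
      rw [if_neg (by simp)]
      rw [List.any_eq_true]
      constructor
      · rintro ⟨i, hi, hx⟩
        rw [List.mem_range] at hi
        have hgetD : (x :: t).getD i 0 = (x :: t)[i] := List.getD_eq_getElem _ _ hi
        rw [hgetD] at hx
        have hlen2 : ((x :: t).eraseIdx i).length ≤ fuel := by
          rw [List.length_eraseIdx_of_lt hi]
          simp only [List.length_cons] at hlen ⊢; omega
        obtain ⟨q, hq, hfold⟩ := (ih _ hlen2 _).mp hx
        refine ⟨(x :: t)[i] :: q, ?_, by simpa using hfold⟩
        exact (hq.cons _).trans (PySem.List.perm_cons_eraseIdx _ (List.getElem?_eq_getElem hi))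
      · rintro ⟨q, hq, hfold⟩
        rcases q with _ | ⟨d, q0⟩
        · exact absurd hq.symm.eq_nil (by simp)
        · obtain ⟨j, hj, hget⟩ := List.getElem_of_mem (hq.mem_iff.mp (List.mem_cons_self))
          subst hget
          have h1 : ((x :: t)[j] :: (x :: t).eraseIdx j).Perm (x :: t) :=
            PySem.List.perm_cons_eraseIdx _ (List.getElem?_eq_getElem hj)
          have hq0 : q0.Perm ((x :: t).eraseIdx j) := (hq.trans h1.symm).cons_inv
          have hlen2 : ((x :: t).eraseIdx j).length ≤ fuel := by
            rw [List.length_eraseIdx_of_lt hj]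
            simp only [List.length_cons] at hlen ⊢; omega
          refine ⟨j, List.mem_range.mpr hj, ?_⟩
          rw [List.getD_eq_getElem _ _ hj]
          exact (ih _ hlen2 _).mpr ⟨q0, hq0, by simpa using hfold⟩

theorem is_constraint_satisfied_op1 (values : List Int) (hne : values ≠ []) (target : Int) :
    ((PySem.List.permutations values values.length).any
        (fun perm => ((perm.drop 1).foldl (· - ·) (perm.headD 0)) == target)) =
      values.any (fun v => 2 * v - values.sum == target) := by
  rcases values with _ | ⟨x, t⟩
  · exact absurd rfl hne
  apply Bool.eq_iff_iff.mpr
  rw [List.any_eq_true, List.any_eq_true]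
  constructor
  · rintro ⟨p, hp, hval⟩
    have hperm := (mem_pyPerms_iff p (x :: t)).mp hp
    rcases p with _ | ⟨d, q⟩
    · exact absurd hperm.symm.eq_nil (by simp)
    · simp only [List.headD_cons, List.drop_one, List.tail_cons, beq_iff_eq] at hval
      rw [foldl_sub_eq] at hval
      have hsum : d + q.sum = (x :: t).sum := by
        have := hperm.sum_eq; simpa using this
      refine ⟨d, hperm.mem_iff.mp List.mem_cons_self, ?_⟩
      simp only [beq_iff_eq, List.sum_cons]
      simp only [List.sum_cons] at hsum
      omega
  · rintro ⟨v, hv, hval⟩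
    simp only [beq_iff_eq] at hval
    refine ⟨v :: (x :: t).erase v, ?_, ?_⟩
    · exact (mem_pyPerms_iff _ _).mpr (List.perm_cons_erase hv).symm
    · simp only [List.headD_cons, List.drop_one, List.tail_cons, beq_iff_eq]
      rw [foldl_sub_eq]
      have hsum : v + ((x :: t).erase v).sum = (x :: t).sum := by
        have h := (List.perm_cons_erase hv).sum_eq
        simp only [List.sum_cons] at h ⊢; omega
      simp only [List.sum_cons] at hsum hval ⊢
      omega

theorem is_constraint_satisfied_op2 (values : List Int) (hne : values ≠ []) (target : Int) :
    ((PySem.List.permutations values values.length).any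
        (fun perm => ((perm.drop 1).foldl PySem.Int.floordiv (perm.headD 0)) == target)) =
      ((List.range values.length).any fun i =>
        reachB values.length target (values.getD i 0) (values.eraseIdx i)) := by
  rcases values with _ | ⟨x, t⟩
  · exact absurd rfl hne
  apply Bool.eq_iff_iff.mpr
  rw [List.any_eq_true, List.any_eq_true]
  constructor
  · rintro ⟨p, hp, hval⟩
    have hperm := (mem_pyPerms_iff p (x :: t)).mp hp
    rcases p with _ | ⟨d, q⟩
    · exact absurd hperm.symm.eq_nil (by simp)
    · simp only [List.headD_cons, List.drop_one, List.tail_cons, beq_iff_eq] at hval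
      obtain ⟨j, hj, hget⟩ := List.getElem_of_mem (hperm.mem_iff.mp (List.mem_cons_self))
      subst hget
      have h1 : ((x :: t)[j] :: (x :: t).eraseIdx j).Perm (x :: t) :=
        PySem.List.perm_cons_eraseIdx _ (List.getElem?_eq_getElem hj)
      have hq : q.Perm ((x :: t).eraseIdx j) := (hperm.trans h1.symm).cons_inv
      refine ⟨j, List.mem_range.mpr hj, ?_⟩
      rw [List.getD_eq_getElem _ _ hj]
      have hlen2 : ((x :: t).eraseIdx j).length ≤ (x :: t).length := by
        rw [List.length_eraseIdx_of_lt hj]; omega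
      exact (reachB_iff target _ _ hlen2 _).mpr ⟨q, hq, hval⟩
  · rintro ⟨i, hi, hx⟩
    rw [List.mem_range] at hi
    rw [List.getD_eq_getElem _ _ hi] at hx
    have hlen2 : ((x :: t).eraseIdx i).length ≤ (x :: t).length := by
      rw [List.length_eraseIdx_of_lt hi]; omega
    obtain ⟨q, hq, hfold⟩ := (reachB_iff target _ _ hlen2 _).mp hx
    refine ⟨(x :: t)[i] :: q, ?_, ?_⟩
    · exact (mem_pyPerms_iff _ _).mpr
        ((hq.cons _).trans (PySem.List.perm_cons_eraseIdx _ (List.getElem?_eq_getElem hi)))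
    · simp only [List.headD_cons, List.drop_one, List.tail_cons, beq_iff_eq]
      exact hfold

-- ===== VERDICT (by name: the statement is the Claim_ definition above) =====
theorem is_constraint_satisfied_spec : Claim_equal_is_constraint_satisfied := by
  intro values operation target _ hpre
  obtain ⟨hne, -⟩ := hpre
  unfold Spec_is_constraint_satisfied is_constraint_satisfied is_constraint_satisfied_alt
  rcases values with _ | ⟨x, t⟩
  · exact absurd rfl hne
  by_cases h0 : operation = 0
  · simp only [h0, List.drop_one, List.tail_cons]
    rw [foldl_add_eq]
    simp [List.sum_cons]
  · simp only [if_neg h0]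
    by_cases h1 : operation = 1
    · simp only [h1, if_true]
      exact (is_constraint_satisfied_op1 (x :: t) (by simp) target)
    · simp only [if_neg h1]
      by_cases h2 : operation = 2
      · simp only [h2, if_true]
        exact (is_constraint_satisfied_op2 (x :: t) (by simp) target)
      · simp only [if_neg h2]
        by_cases h3 : operation = 3
        · simp only [h3, List.drop_one, List.tail_cons, List.headD_cons]
          rw [foldl_mul_eq, List.foldl_cons, foldl_mul_eq]
          norm_num
        · simp only [if_neg h3, List.headD_cons]
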